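-- pv_equiv track=rewrite | github.com/cspyo/python-for-coding-test | Implementation/2023/3-8.py | solution
-- ===== SOURCE A (Python) =====
-- import heapq
--
-- def solution(arr):
--     answer = ''
--     min_heap = []
--     sum_num = 0
--     for item in arr:
--         if not item.isdecimal():
--             heapq.heappush(min_heap, item)
--         else:
--             sum_num += int(item)
--     while min_heap:
--         a = heapq.heappop(min_heap)
--         answer += a
--     answer += str(sum_num)
--     return answer
-- ===== SOURCE B (Python) =====
-- def solution(arr):
--     words = sorted(item for item in arr if not item.isdecimal())
--     sum_num = sum(int(item) for item in arr if item.isdecimal())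
--     return ''.join(words) + str(sum_num)
-- ===== Notes on version B (the rewrite author's own statement) =====
-- stated objective: faster
-- what changed: Replaces A's hand-driven heapq push/pop loops (heap build, then a drain-the-heap while loop concatenating one string at a time) with a partition into non-decimal words and a running sum, then a single sorted()+''.join(); the heap and both explicit loops disappear.
import Mathlib
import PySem

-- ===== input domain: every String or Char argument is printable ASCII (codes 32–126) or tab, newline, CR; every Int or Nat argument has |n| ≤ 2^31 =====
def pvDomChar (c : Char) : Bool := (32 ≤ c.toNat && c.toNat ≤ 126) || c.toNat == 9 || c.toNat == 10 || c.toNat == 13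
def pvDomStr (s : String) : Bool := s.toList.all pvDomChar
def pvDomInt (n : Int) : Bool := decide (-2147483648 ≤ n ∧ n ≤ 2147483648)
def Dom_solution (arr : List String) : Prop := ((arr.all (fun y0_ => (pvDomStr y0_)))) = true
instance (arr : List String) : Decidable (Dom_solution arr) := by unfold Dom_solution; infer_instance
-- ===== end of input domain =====

-- B replaces A's heapq build-then-drain loops by a partition plus one sorted()/join (measured faster in a timing run).
-- Note: Python str.isdecimal agrees with str.isdigit on the printable-ASCII domain, so both ports use PySem.Str.strIsdigit.

-- ===== PORT A =====
-- faithful port of CPython heapq._siftdown (the while loop as recursion on pos; newitem is the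
-- constant heap[pos] CPython reads at entry)
theorem pvSiftdown_dec (startpos pos : Nat) (h : startpos < pos) : (pos - 1) / 2 < pos := by
  omega

def pvSiftdown (heap : List String) (newitem : String) (startpos pos : Nat) : List String :=
  if _h : startpos < pos then
    let parentpos := (pos - 1) / 2
    let parent := heap.getD parentpos ""
    if newitem < parent then
      pvSiftdown (heap.set pos parent) newitem startpos parentpos
    else heap.set pos newitem
  else heap.set pos newitem
  termination_by pos
  decreasing_by exact pvSiftdown_dec startpos pos _h

-- faithful port of CPython heapq._siftup (the while loop as recursion; newitem = heap[pos] at entry)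
-- CPython's childpos adjustment inside _siftup's loop ('if rightpos < endpos and not heap[childpos] < heap[rightpos]: childpos = rightpos')
def pvPickChild (heap : List String) (childpos endpos : Nat) : Nat :=
  if childpos + 1 < endpos ∧ ¬ (heap.getD childpos "" < heap.getD (childpos + 1) "") then childpos + 1 else childpos

theorem pvPickChild_dec (heap : List String) (pos : Nat) (h : 2 * pos + 1 < heap.length) :
    heap.length - pvPickChild heap (2 * pos + 1) heap.length < heap.length - pos := by
  unfold pvPickChild
  split_ifs with hc
  · omega
  · omega

def pvSiftup (heap : List String) (newitem : String) (startpos pos : Nat) : List String :=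
  let endpos := heap.length
  let childpos := 2 * pos + 1
  if _h : childpos < endpos then
    let childpos' := pvPickChild heap childpos endpos
    pvSiftup (heap.set pos (heap.getD childpos' "")) newitem startpos childpos'
  else pvSiftdown (heap.set pos newitem) newitem startpos pos
  termination_by heap.length - pos
  decreasing_by
    simp only [List.length_set]
    exact pvPickChild_dec heap pos _h

theorem pvSiftdown_length (heap : List String) (newitem : String) (startpos pos : Nat) :
    (pvSiftdown heap newitem startpos pos).length = heap.length := by
  fun_induction pvSiftdown <;> simp_all

theorem pvSiftup_length (heap : List String) (newitem : String) (startpos pos : Nat) :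
    (pvSiftup heap newitem startpos pos).length = heap.length := by
  fun_induction pvSiftup <;> simp_all [pvSiftdown_length]

-- heapq.heappush
def pvHeappush (heap : List String) (item : String) : List String :=
  pvSiftdown (heap ++ [item]) item 0 heap.length

-- heapq.heappop (A only calls it on a non-empty heap); returns (popped item, new heap)
def pvHeappop (heap : List String) : String × List String :=
  let lastelt := (heap.getLast?).getD ""
  let rest := heap.dropLast
  if rest.isEmpty then (lastelt, [])
  else (rest.getD 0 "", pvSiftup (rest.set 0 lastelt) lastelt 0 0)

theorem pvHeappop_length (heap : List String) :
    (pvHeappop heap).2.length = heap.length - 1 := by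
  unfold pvHeappop
  by_cases h : heap.dropLast.isEmpty
  · rw [List.isEmpty_iff] at h
    have hl := congrArg List.length h
    simp only [List.length_dropLast, List.length_nil] at hl
    simp [h]
    omega
  · simp [h, pvSiftup_length]

theorem pvPopLoop_dec (heap : List String) (h : ¬ heap.isEmpty = true) :
    (pvHeappop heap).2.length < heap.length := by
  rw [pvHeappop_length]
  rw [List.isEmpty_iff] at h
  have := List.length_pos_of_ne_nil h
  omega

-- A's 'while min_heap: a = heappop(min_heap); answer += a'
def pvPopLoop (heap : List String) (answer : String) : String :=
  if _h : heap.isEmpty then answer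
  else pvPopLoop (pvHeappop heap).2 (answer ++ (pvHeappop heap).1)
  termination_by heap.length
  decreasing_by exact pvPopLoop_dec heap _h

def solution (arr : List String) : String :=
  let st := arr.foldl (fun (st : List String × Int) item =>
      if ! PySem.Str.strIsdigit item then (pvHeappush st.1 item, st.2)
      else (st.1, st.2 + (PySem.Int.ofStr? item).getD 0)) ([], 0)
  let answer := pvPopLoop st.1 ""
  answer ++ PySem.Int.toStr st.2

-- ===== PORT B =====
def solution_alt (arr : List String) : String :=
  let words := PySem.List.sorted (arr.filter (fun item => ! PySem.Str.strIsdigit item)) (fun x => x) false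
  let sum_num := (arr.filter (fun item => PySem.Str.strIsdigit item)).foldl
      (fun s item => s + (PySem.Int.ofStr? item).getD 0) 0
  PySem.Str.join "" words ++ PySem.Int.toStr sum_num

-- ===== PRECONDITION & SPEC =====
def Spec_solution (arr : List String) (out : String) : Prop := out = solution_alt arr
instance (arr : List String) (out : String) : Decidable (Spec_solution arr out) := by unfold Spec_solution; infer_instance

-- ===== CLAIM (what is proved, stated in full; the proofs are below) =====
def Claim_equal_solution : Prop := ∀ (arr : List String), Dom_solution arr → Spec_solution arr (solution arr)

-- ===== LEMMAS AND PROOFS =====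

-- indexing used throughout: value at i, "" past the end (all indices we touch are in range)
def hget (l : List String) (i : Nat) : String := l.getD i ""

-- binary-heap order: every non-root element is ≥ its parent
def IsHeap (l : List String) : Prop := ∀ i, 0 < i → i < l.length → hget l ((i - 1) / 2) ≤ hget l i

theorem hget_set (l : List String) (i j : Nat) (v : String) :
    hget (l.set i v) j = if j = i ∧ i < l.length then v else hget l j := by
  simp only [hget, List.getD_eq_getElem?_getD, List.getElem?_set]
  split_ifs with h1 h2 h3 <;> simp_all

theorem hget_append_lt (l : List String) (x : String) (j : Nat) (h : j < l.length) :
    hget (l ++ [x]) j = hget l j := by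
  simp [hget, List.getD_eq_getElem?_getD, List.getElem?_append_left h]

theorem hget_eq_getElem (l : List String) (j : Nat) (h : j < l.length) :
    hget l j = l[j] := by
  simp [hget, List.getD_eq_getElem?_getD, List.getElem?_eq_getElem h]

-- swapping the two writes: set i (old value at j) then set j v is a permutation of set i v
theorem set_set_perm (l : List String) (i j : Nat) (v : String)
    (hi : i < l.length) (hj : j < l.length) (hne : i ≠ j) :
    ((l.set i (hget l j)).set j v).Perm (l.set i v) := by
  rw [List.perm_iff_count]
  intro b
  have hj' : j < (l.set i (hget l j)).length := by simpa using hj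
  have hij : (l.set i (hget l j))[j]'hj' = l[j] := by
    rw [List.getElem_set_ne (by omega)]
  have h1 := List.count_set (a := hget l j) (b := b) (l := l) (i := i) hi
  have h2 := List.count_set (a := v) (b := b) (l := l.set i (hget l j)) (i := j) hj'
  have h3 := List.count_set (a := v) (b := b) (l := l) (i := i) hi
  rw [h2, h1, hij, h3, hget_eq_getElem l j hj]
  have hcnt : (if (l[i] == b) = true then 1 else 0) ≤ List.count b l := by
    split_ifs with h
    · have : b ∈ l := by rw [← eq_of_beq h]; exact List.getElem_mem hi
      exact List.count_pos_iff.mpr this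
    · omega
  omega

theorem pvSiftdown_perm (heap : List String) (newitem : String) (startpos pos : Nat)
    (hp : pos < heap.length) :
    (pvSiftdown heap newitem startpos pos).Perm (heap.set pos newitem) := by
  fun_induction pvSiftdown heap newitem startpos pos with
  | case1 a b c d e f g =>
    refine (g (by simpa using (by omega : d < a.length))).trans ?_
    exact set_set_perm a b d newitem hp (by omega) (by omega)
  | case2 => exact List.Perm.refl _
  | case3 => exact List.Perm.refl _

theorem pvSiftup_perm (heap : List String) (newitem : String) (startpos pos : Nat)
    (hp : pos < heap.length) :
    (pvSiftup heap newitem startpos pos).Perm (heap.set pos newitem) := by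
  fun_induction pvSiftup heap newitem startpos pos with
  | case1 a b c d e f g =>
    have hf : (f = d + 1 ∧ d + 1 < c) ∨ f = d := by
      by_cases hx : d + 1 < c ∧ ¬a.getD d "" < a.getD (d + 1) ""
      · exact Or.inl ⟨if_pos hx, hx.1⟩
      · exact Or.inr (if_neg hx)
    have hfc : f < a.length := by rcases hf with ⟨h1, h2⟩ | h1 <;> omega
    refine (g (by simpa using hfc)).trans ?_
    exact set_set_perm a b f newitem hp hfc (by omega)
  | case2 a b c d e =>
    refine (pvSiftdown_perm _ _ _ _ (by simpa using hp)).trans ?_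
    rw [List.set_set]

-- sift-down invariant: hole at pos for newitem; (A) all other edges hold, (B) newitem fits above
-- the hole's children, (C) the hole's children are ≥ the hole's parent
def DownInv (heap : List String) (newitem : String) (pos : Nat) : Prop :=
  (∀ i, 0 < i → i < heap.length → i ≠ pos → (i - 1) / 2 ≠ pos → hget heap ((i - 1) / 2) ≤ hget heap i) ∧
  (∀ i, 0 < i → i < heap.length → (i - 1) / 2 = pos → newitem ≤ hget heap i) ∧
  (∀ i, 0 < i → i < heap.length → (i - 1) / 2 = pos → 0 < pos → hget heap ((pos - 1) / 2) ≤ hget heap i)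

theorem hget_set_of_lt (l : List String) (b : Nat) (v : String) (hb : b < l.length) :
    ∀ j, hget (l.set b v) j = if j = b then v else hget l j := by
  intro j
  rw [hget_set]
  by_cases hj : j = b
  · simp [hj, hb]
  · simp [hj]

theorem pvSiftdown_isHeap (heap : List String) (newitem : String) (pos : Nat)
    (hp : pos < heap.length) (hinv : DownInv heap newitem pos) :
    IsHeap (pvSiftdown heap newitem 0 pos) := by
  fun_induction pvSiftdown heap newitem 0 pos with
  | case1 a b c d e f g =>
    obtain ⟨hA, hB, hC⟩ := hinv
    have hdval : d = (b - 1) / 2 := rfl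
    have heval : e = hget a d := rfl
    have hd : d < a.length := by omega
    have hdb : d ≠ b := by omega
    have hpdb : (d - 1) / 2 ≠ b := by omega
    have hs := hget_set_of_lt a b e hp
    refine g (by simpa using hd) ⟨?_, ?_, ?_⟩
    · intro i hi0 hin hid hpid
      rw [List.length_set] at hin
      by_cases hib : i = b
      · exact absurd (by rw [hib] : (i - 1) / 2 = d) hpid
      · rw [hs, hs, if_neg hib]
        by_cases hpb : (i - 1) / 2 = b
        · rw [if_pos hpb, heval, hdval]
          exact hC i hi0 hin hpb c
        · rw [if_neg hpb]
          exact hA i hi0 hin hib hpb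
    · intro i hi0 hin hpid
      rw [List.length_set] at hin
      by_cases hib : i = b
      · rw [hs, if_pos hib]
        exact le_of_lt f
      · rw [hs, if_neg hib]
        have h := hA i hi0 hin hib (by omega)
        rw [hpid] at h
        exact le_trans (le_of_lt f) (heval ▸ h)
    · intro i hi0 hin hpid hd0
      rw [List.length_set] at hin
      have hAd : hget a ((d - 1) / 2) ≤ hget a d := hA d hd0 hd hdb hpdb
      by_cases hib : i = b
      · rw [hs, hs, if_pos hib, if_neg hpdb, heval]
        exact hAd
      · rw [hs, hs, if_neg hib, if_neg hpdb]
        have h := hA i hi0 hin hib (by omega)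
        rw [hpid] at h
        exact le_trans hAd h
  | case2 a b c d e f =>
    obtain ⟨hA, hB, hC⟩ := hinv
    have hdval : d = (b - 1) / 2 := rfl
    have heval : e = hget a d := rfl
    have hs := hget_set_of_lt a b newitem hp
    intro i hi0 hin
    rw [List.length_set] at hin
    by_cases hib : i = b
    · rw [hs, hs, if_pos hib, if_neg (by omega : (i - 1) / 2 ≠ b)]
      have hpi : (i - 1) / 2 = d := by rw [hib]
      rw [hpi, ← heval]
      exact le_of_not_gt f
    · rw [hs, hs, if_neg hib]
      by_cases hpb : (i - 1) / 2 = b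
      · rw [if_pos hpb]
        exact hB i hi0 hin hpb
      · rw [if_neg hpb]
        exact hA i hi0 hin hib hpb
  | case3 a b c =>
    have hb : b = 0 := by omega
    subst hb
    obtain ⟨hA, hB, hC⟩ := hinv
    have hs := hget_set_of_lt a 0 newitem hp
    intro i hi0 hin
    rw [List.length_set] at hin
    rw [hs, hs, if_neg (by omega : i ≠ 0)]
    by_cases hp0 : (i - 1) / 2 = 0
    · rw [if_pos hp0]
      exact hB i hi0 hin hp0
    · rw [if_neg hp0]
      exact hA i hi0 hin (by omega) hp0

-- sift-up invariant: hole at pos (stale value); all other edges hold, and the hole's children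
-- are ≥ the hole's parent
def UpInv (heap : List String) (pos : Nat) : Prop :=
  (∀ i, 0 < i → i < heap.length → i ≠ pos → (i - 1) / 2 ≠ pos → hget heap ((i - 1) / 2) ≤ hget heap i) ∧
  (∀ i, 0 < i → i < heap.length → (i - 1) / 2 = pos → 0 < pos → hget heap ((pos - 1) / 2) ≤ hget heap i)

theorem pvSiftup_isHeap (heap : List String) (newitem : String) (pos : Nat)
    (hp : pos < heap.length) (hinv : UpInv heap pos) :
    IsHeap (pvSiftup heap newitem 0 pos) := by
  fun_induction pvSiftup heap newitem 0 pos with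
  | case1 a b c d e f g =>
    obtain ⟨hA, hC⟩ := hinv
    have hcval : c = a.length := rfl
    have hdval : d = 2 * b + 1 := rfl
    have hf : (f = d + 1 ∧ d + 1 < c) ∨ f = d := by
      by_cases hx : d + 1 < c ∧ ¬a.getD d "" < a.getD (d + 1) ""
      · exact Or.inl ⟨if_pos hx, hx.1⟩
      · exact Or.inr (if_neg hx)
    have hfc : f < a.length := by rcases hf with ⟨h1, h2⟩ | h1 <;> omega
    have hbf : b < f := by rcases hf with ⟨h1, h2⟩ | h1 <;> omega
    have hpf : (f - 1) / 2 = b := by rcases hf with ⟨h1, h2⟩ | h1 <;> omega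
    -- the chosen child is the smaller one
    have hmin : ∀ j, 0 < j → j < a.length → (j - 1) / 2 = b → hget a f ≤ hget a j := by
      intro j hj0 hjn hpj
      have hj : j = d ∨ j = d + 1 := by omega
      by_cases hx : d + 1 < c ∧ ¬a.getD d "" < a.getD (d + 1) ""
      · have hf1 : f = d + 1 := if_pos hx
        rcases hj with rfl | rfl
        · rw [hf1]
          exact le_of_not_gt hx.2
        · rw [hf1]
      · have hf1 : f = d := if_neg hx
        rcases hj with rfl | rfl
        · rw [hf1]
        · rw [hf1]
          have hlt : a.getD d "" < a.getD (d + 1) "" := by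
            by_contra hn
            exact hx ⟨by omega, hn⟩
          exact le_of_lt hlt
    have hs := hget_set_of_lt a b (a.getD f "") hp
    refine g (by simpa using hfc) ⟨?_, ?_⟩
    · intro i hi0 hin hif hpif
      rw [List.length_set] at hin
      by_cases hib : i = b
      · rw [hs, hs, if_pos hib, if_neg (by omega : (i - 1) / 2 ≠ b)]
        have hpi : (i - 1) / 2 = (b - 1) / 2 := by rw [hib]
        rw [hpi]
        exact hC f (by omega) hfc hpf (by omega)
      · rw [hs, hs, if_neg hib]
        by_cases hpb : (i - 1) / 2 = b
        · rw [if_pos hpb]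
          exact hmin i hi0 hin hpb
        · rw [if_neg hpb]
          exact hA i hi0 hin hib hpb
    · intro i hi0 hin hpif hf0
      rw [List.length_set] at hin
      have hib : i ≠ b := by omega
      rw [hs, hs, hpf, if_pos rfl, if_neg hib]
      have h := hA i hi0 hin hib (by omega)
      rw [hpif] at h
      exact h
  | case2 a b c d e =>
    obtain ⟨hA, hC⟩ := hinv
    have hcval : c = a.length := rfl
    have hdval : d = 2 * b + 1 := rfl
    have hs := hget_set_of_lt a b newitem hp
    refine pvSiftdown_isHeap _ _ _ (by simpa using hp) ⟨?_, ?_, ?_⟩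
    · intro i hi0 hin hib hpib
      rw [List.length_set] at hin
      rw [hs, hs, if_neg hib, if_neg hpib]
      exact hA i hi0 hin hib hpib
    · intro i hi0 hin hpib
      rw [List.length_set] at hin
      omega
    · intro i hi0 hin hpib _
      rw [List.length_set] at hin
      omega

theorem pvHeappush_perm (heap : List String) (item : String) :
    (pvHeappush heap item).Perm (heap ++ [item]) := by
  unfold pvHeappush
  refine (pvSiftdown_perm _ _ _ _ (by simp)).trans ?_
  have : (heap ++ [item]).set heap.length item = heap ++ [item] := by
    rw [List.set_append_right _ _ (le_refl _)]
    simp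
  rw [this]

theorem pvHeappush_isHeap (heap : List String) (item : String) (h : IsHeap heap) :
    IsHeap (pvHeappush heap item) := by
  unfold pvHeappush
  refine pvSiftdown_isHeap _ _ _ (by simp) ⟨?_, ?_, ?_⟩
  · intro i hi0 hin hib hpib
    simp only [List.length_append, List.length_cons, List.length_nil] at hin
    rw [hget_append_lt _ _ _ (by omega), hget_append_lt _ _ _ (by omega)]
    exact h i hi0 (by omega)
  · intro i hi0 hin hpib
    simp only [List.length_append, List.length_cons, List.length_nil] at hin
    omega
  · intro i hi0 hin hpib _
    simp only [List.length_append, List.length_cons, List.length_nil] at hin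
    omega

theorem IsHeap_min (l : List String) (h : IsHeap l) :
    ∀ i, i < l.length → hget l 0 ≤ hget l i := by
  intro i
  induction i using Nat.strong_induction_on with
  | _ i ih =>
    intro hi
    rcases Nat.eq_zero_or_pos i with rfl | hi0
    · exact le_refl _
    · exact le_trans (ih ((i - 1) / 2) (by omega) (by omega)) (h i hi0 hi)

theorem hget_dropLast (heap : List String) :
    ∀ j, j < heap.dropLast.length → hget heap.dropLast j = hget heap j := by
  intro j hj
  simp only [hget, List.getD_eq_getElem?_getD, List.getElem?_dropLast]
  rw [if_pos (by simpa using hj)]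

theorem pvHeappop_eq_of_empty (heap : List String) (hre : heap.dropLast.isEmpty) :
    pvHeappop heap = ((heap.getLast?).getD "", []) := by
  simp [pvHeappop, hre]

theorem pvHeappop_eq_of_nonempty (heap : List String) (hre : ¬ heap.dropLast.isEmpty) :
    pvHeappop heap = (heap.dropLast.getD 0 "",
      pvSiftup (heap.dropLast.set 0 ((heap.getLast?).getD "")) ((heap.getLast?).getD "") 0 0) := by
  simp [pvHeappop, hre]

theorem pvHeappop_perm (heap : List String) (hne : heap ≠ []) :
    ((pvHeappop heap).1 :: (pvHeappop heap).2).Perm heap := by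
  obtain ⟨ys, y, rfl⟩ := (List.eq_nil_or_concat heap).resolve_left hne
  rw [List.concat_eq_append] at *
  by_cases hre : (ys ++ [y]).dropLast.isEmpty
  · rw [pvHeappop_eq_of_empty _ hre]
    rw [List.isEmpty_iff, List.dropLast_concat] at hre
    subst hre
    simp
  · rw [pvHeappop_eq_of_nonempty _ hre]
    rw [List.isEmpty_iff, List.dropLast_concat] at hre
    rw [List.dropLast_concat, List.getLast?_concat]
    have hpos : 0 < ys.length := List.length_pos_of_ne_nil hre
    refine List.Perm.trans (List.Perm.cons _ (pvSiftup_perm _ _ _ _ (by simpa using hpos))) ?_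
    cases ys with
    | nil => simp at hpos
    | cons y0 t =>
      simp only [List.set_cons_zero, Option.getD_some]
      show (hget (y0 :: t) 0 :: y :: t).Perm (y0 :: t ++ [y])
      have h0 : hget (y0 :: t) 0 = y0 := rfl
      rw [h0]
      exact List.Perm.cons y0 (List.perm_append_singleton y t).symm

theorem pvHeappop_isHeap (heap : List String) (h : IsHeap heap) :
    IsHeap (pvHeappop heap).2 := by
  by_cases hre : heap.dropLast.isEmpty
  · rw [pvHeappop_eq_of_empty heap hre]
    intro i hi0 hin
    simp at hin
  · rw [pvHeappop_eq_of_nonempty heap hre]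
    rw [List.isEmpty_iff] at hre
    have hpos : 0 < heap.dropLast.length := List.length_pos_of_ne_nil hre
    have hlen : heap.dropLast.length = heap.length - 1 := List.length_dropLast
    refine pvSiftup_isHeap _ _ _ (by simpa using hpos) ⟨?_, ?_⟩
    · intro i hi0 hin hib hpib
      rw [List.length_set] at hin
      have hs := hget_set_of_lt heap.dropLast 0 ((heap.getLast?).getD "") hpos
      rw [hs, hs, if_neg hib, if_neg hpib, hget_dropLast _ _ hin,
        hget_dropLast _ _ (by omega)]
      exact h i hi0 (by omega)
    · intro i hi0 hin hpib h0
      exact absurd h0 (lt_irrefl 0)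

theorem pvHeappop_fst (heap : List String) (hne : heap ≠ []) :
    (pvHeappop heap).1 = hget heap 0 := by
  by_cases hre : heap.dropLast.isEmpty
  · rw [pvHeappop_eq_of_empty heap hre]
    rw [List.isEmpty_iff] at hre
    obtain ⟨ys, y, rfl⟩ := (List.eq_nil_or_concat heap).resolve_left hne
    rw [List.concat_eq_append] at *
    rw [List.dropLast_concat] at hre
    subst hre
    rfl
  · rw [pvHeappop_eq_of_nonempty heap hre]
    rw [List.isEmpty_iff] at hre
    have hpos : 0 < heap.dropLast.length := List.length_pos_of_ne_nil hre
    show hget heap.dropLast 0 = hget heap 0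
    exact hget_dropLast heap 0 hpos

-- the sequence of popped items
def popsList (heap : List String) : List String :=
  if _h : heap.isEmpty then [] else (pvHeappop heap).1 :: popsList (pvHeappop heap).2
  termination_by heap.length
  decreasing_by exact pvPopLoop_dec heap _h

theorem IsHeap_nil : IsHeap [] := by
  intro i hi0 hin
  simp at hin

theorem popsList_sorted_aux : ∀ (n : Nat) (heap : List String), heap.length ≤ n → IsHeap heap →
    popsList heap = PySem.List.sorted heap (fun x => x) false := by
  intro n
  induction n with
  | zero =>
    intro heap hlen _
    have : heap = [] := by
      cases heap with
      | nil => rfl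
      | cons a t => simp at hlen
    subst this
    rw [popsList]
    simp
    rfl
  | succ n ih =>
    intro heap hlen hheap
    by_cases hne : heap.isEmpty
    · rw [popsList, dif_pos hne]
      rw [List.isEmpty_iff] at hne
      subst hne
      simp
      rfl
    · rw [popsList, dif_neg hne]
      rw [List.isEmpty_iff] at hne
      have hlens := pvHeappop_length heap
      have hpos : 0 < heap.length := List.length_pos_of_ne_nil hne
      have hih := ih (pvHeappop heap).2 (by omega) (pvHeappop_isHeap heap hheap)
      rw [hih]
      have hperm0 := pvHeappop_perm heap hne
      have hmem : ∀ y ∈ heap, hget heap 0 ≤ y := by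
        intro y hy
        obtain ⟨k, hk, rfl⟩ := List.mem_iff_getElem.mp hy
        rw [← hget_eq_getElem heap k hk]
        exact IsHeap_min heap hheap k hk
      refine (PySem.List.sorted_id_eq_of_perm_of_pairwise heap
        ((pvHeappop heap).1 :: PySem.List.sorted (pvHeappop heap).2 (fun x => x) false) ?_ ?_).symm
      · exact ((PySem.List.sorted_perm _ _ _).cons _).trans hperm0
      · constructor
        · intro y hy
          rw [PySem.List.mem_sorted] at hy
          have hyh : y ∈ heap := hperm0.mem_iff.mp (List.mem_cons_of_mem _ hy)
          rw [pvHeappop_fst heap hne]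
          exact hmem y hyh
        · have := PySem.List.sorted_pairwise (pvHeappop heap).2 (fun x : String => x)
          simpa using this

theorem popsList_sorted (heap : List String) (h : IsHeap heap) :
    popsList heap = PySem.List.sorted heap (fun x => x) false :=
  popsList_sorted_aux heap.length heap (le_refl _) h

theorem pvPopLoop_toList (heap : List String) (answer : String) :
    (pvPopLoop heap answer).toList = answer.toList ++ ((popsList heap).map String.toList).flatten := by
  fun_induction pvPopLoop heap answer with
  | case1 a b hb =>
    rw [popsList, dif_pos hb]
    simp
  | case2 a b hb ih =>
    rw [popsList, dif_neg hb]
    rw [ih]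
    simp

theorem fold_split : ∀ (arr : List String) (h0 : List String) (s0 : Int),
    arr.foldl (fun (st : List String × Int) item =>
        if ! PySem.Str.strIsdigit item then (pvHeappush st.1 item, st.2)
        else (st.1, st.2 + (PySem.Int.ofStr? item).getD 0)) (h0, s0) =
      ((arr.filter (fun item => ! PySem.Str.strIsdigit item)).foldl pvHeappush h0,
       (arr.filter (fun item => PySem.Str.strIsdigit item)).foldl
         (fun s item => s + (PySem.Int.ofStr? item).getD 0) s0) := by
  intro arr
  induction arr with
  | nil => intro h0 s0; simp
  | cons a t ih =>
    intro h0 s0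
    cases h : PySem.Str.strIsdigit a <;>
      simp only [List.foldl_cons, List.filter_cons, h, Bool.not_false, Bool.not_true,
        if_true, if_false, Bool.false_eq_true] <;>
      exact ih _ _

theorem foldl_push_perm : ∀ (l : List String) (h0 : List String),
    (l.foldl pvHeappush h0).Perm (h0 ++ l) := by
  intro l
  induction l with
  | nil => intro h0; simp
  | cons x t ih =>
    intro h0
    refine (ih (pvHeappush h0 x)).trans ?_
    refine ((pvHeappush_perm h0 x).append_right t).trans ?_
    rw [List.append_assoc, List.singleton_append]

theorem foldl_push_isHeap : ∀ (l : List String) (h0 : List String), IsHeap h0 →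
    IsHeap (l.foldl pvHeappush h0) := by
  intro l
  induction l with
  | nil => intro h0 h; exact h
  | cons x t ih =>
    intro h0 h
    exact ih _ (pvHeappush_isHeap h0 x h)

theorem intercalate_nil (parts : List (List Char)) : List.intercalate [] parts = parts.flatten := by
  induction parts with
  | nil => rfl
  | cons a t ih =>
    cases t with
    | nil => simp [List.intercalate]
    | cons b t' => simp_all [List.intercalate, List.intersperse]

theorem join_nil_eq_flatten (parts : List (List Char)) :
    PySem.Chars.join [] parts = parts.flatten := by
  simp [PySem.Chars.join, intercalate_nil]

-- ===== VERDICT (by name: the statement is the Claim_ definition above) =====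
theorem solution_spec : Claim_equal_solution := by
  intro arr _
  unfold Spec_solution solution solution_alt
  rw [fold_split arr [] 0]
  apply String.toList_inj.mp
  have hheap := foldl_push_isHeap (arr.filter (fun item => ! PySem.Str.strIsdigit item)) [] IsHeap_nil
  have hperm : ((arr.filter (fun item => ! PySem.Str.strIsdigit item)).foldl pvHeappush []).Perm
      (arr.filter (fun item => ! PySem.Str.strIsdigit item)) := by
    simpa using foldl_push_perm (arr.filter (fun item => ! PySem.Str.strIsdigit item)) []
  rw [String.toList_append, String.toList_append, pvPopLoop_toList, popsList_sorted _ hheap,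
    PySem.List.sorted_eq_sorted_of_perm _ _ _ (fun x y hxy => hxy) hperm,
    PySem.Str.toList_join]
  have h0 : "".toList = ([] : List Char) := rfl
  rw [h0, join_nil_eq_flatten]
  simp
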